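-- pv_equiv track=rewrite | github.com/lebowski36/Voxel-Castle | scripts/migrate_blocks.py | categorize_blocks
-- ===== SOURCE A (Python) =====
-- def categorize_blocks(block_mapping):
--     """Sort blocks into categories for separate files"""
--     categories = {
--         "terrain": {},      # 0-49: terrain, stone varieties, ores, organic
--         "fluids": {},       # 50-59: fluids and gases
--         "processed": {},    # 60-99: processed materials
--         "functional": {},   # 100-149: functional blocks
--         "advanced": {},     # 150-179: crystals, magical materials
--         "placeholder": {}   # 180-255: placeholders
--     }
--
--     for block_id, block_info in block_mapping.items():
--         if 0 <= block_id <= 49: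
--             categories["terrain"][block_id] = block_info
--         elif 50 <= block_id <= 59:
--             categories["fluids"][block_id] = block_info
--         elif 60 <= block_id <= 99:
--             categories["processed"][block_id] = block_info
--         elif 100 <= block_id <= 149:
--             categories["functional"][block_id] = block_info
--         elif 150 <= block_id <= 179:
--             categories["advanced"][block_id] = block_info
--         else:  # 180-255
--             categories["placeholder"][block_id] = block_info
--
--     return categories
-- ===== SOURCE B (Python) =====
-- def categorize_blocks(block_mapping):
--     """Sort blocks into categories for separate files"""
--     breaks = [0, 50, 60, 100, 150, 180]
--     cats = ["placeholder", "terrain", "fluids", "processed",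
--             "functional", "advanced", "placeholder"]
--     categories = {name: {} for name in
--                   ["terrain", "fluids", "processed", "functional",
--                    "advanced", "placeholder"]}
--     for block_id, block_info in block_mapping.items():
--         # index of the half-open interval containing block_id
--         idx = sum(1 for b in breaks if b <= block_id)
--         categories[cats[idx]][block_id] = block_info
--     return categories
-- ===== Notes on version B (the rewrite author's own statement) =====
-- stated objective: idiomatic
-- what changed: Replaces the six-way if/elif chain with a breakpoint table and a category-name table indexed by the count of breakpoints not exceeding the block id, with the placeholder category at both ends of the table covering the else branch.
import Mathlib
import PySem

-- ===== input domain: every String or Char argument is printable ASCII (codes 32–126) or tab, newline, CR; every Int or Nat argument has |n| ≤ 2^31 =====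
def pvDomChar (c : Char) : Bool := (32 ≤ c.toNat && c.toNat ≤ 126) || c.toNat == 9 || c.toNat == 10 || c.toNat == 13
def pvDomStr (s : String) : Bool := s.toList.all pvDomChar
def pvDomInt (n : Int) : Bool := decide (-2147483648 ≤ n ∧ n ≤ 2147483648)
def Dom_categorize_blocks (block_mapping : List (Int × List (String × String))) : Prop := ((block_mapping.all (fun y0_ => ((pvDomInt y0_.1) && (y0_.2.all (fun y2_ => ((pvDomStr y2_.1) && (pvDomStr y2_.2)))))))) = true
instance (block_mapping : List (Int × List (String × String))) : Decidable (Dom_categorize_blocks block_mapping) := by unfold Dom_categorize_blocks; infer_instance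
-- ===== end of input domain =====

-- ===== PORT A =====
def categorize_blocks (block_mapping : List (Int × List (String × String))) : List (String × List (Int × List (String × String))) :=
  let categories : PySem.Dict String (PySem.Dict Int (List (String × String))) :=
    PySem.Dict.ofList [("terrain", PySem.Dict.empty), ("fluids", PySem.Dict.empty),
      ("processed", PySem.Dict.empty), ("functional", PySem.Dict.empty),
      ("advanced", PySem.Dict.empty), ("placeholder", PySem.Dict.empty)]
  let final := block_mapping.foldl (fun cats p =>
    let block_id := p.1
    let block_info := p.2
    if 0 ≤ block_id ∧ block_id ≤ 49 then
      cats.modify "terrain" PySem.Dict.empty (fun d => d.insert block_id block_info)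
    else if 50 ≤ block_id ∧ block_id ≤ 59 then
      cats.modify "fluids" PySem.Dict.empty (fun d => d.insert block_id block_info)
    else if 60 ≤ block_id ∧ block_id ≤ 99 then
      cats.modify "processed" PySem.Dict.empty (fun d => d.insert block_id block_info)
    else if 100 ≤ block_id ∧ block_id ≤ 149 then
      cats.modify "functional" PySem.Dict.empty (fun d => d.insert block_id block_info)
    else if 150 ≤ block_id ∧ block_id ≤ 179 then
      cats.modify "advanced" PySem.Dict.empty (fun d => d.insert block_id block_info)
    else
      cats.modify "placeholder" PySem.Dict.empty (fun d => d.insert block_id block_info)) categories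
  final.items.map (fun q => (q.1, q.2.items))

-- ===== PORT B =====
-- idx = sum(1 for b in breaks if b <= block_id), i.e. bisect_right of the breakpoint table
def pvIdxOf (block_id : Int) : Nat :=
  [(0 : Int), 50, 60, 100, 150, 180].countP (fun b => b ≤ block_id)

def categorize_blocks_alt (block_mapping : List (Int × List (String × String))) : List (String × List (Int × List (String × String))) :=
  let cats := ["placeholder", "terrain", "fluids", "processed", "functional", "advanced", "placeholder"]
  let categories : PySem.Dict String (PySem.Dict Int (List (String × String))) :=
    PySem.Dict.ofList (["terrain", "fluids", "processed", "functional", "advanced", "placeholder"].map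
      (fun name => (name, PySem.Dict.empty)))
  let final := block_mapping.foldl (fun acc p =>
    acc.modify (cats.getD (pvIdxOf p.1) "") PySem.Dict.empty
      (fun d => d.insert p.1 p.2)) categories
  final.items.map (fun q => (q.1, q.2.items))

-- ===== PRECONDITION & SPEC =====
def Spec_categorize_blocks (block_mapping : List (Int × List (String × String))) (out : List (String × List (Int × List (String × String)))) : Prop := out = categorize_blocks_alt block_mapping
instance (block_mapping : List (Int × List (String × String))) (out : List (String × List (Int × List (String × String)))) : Decidable (Spec_categorize_blocks block_mapping out) := by unfold Spec_categorize_blocks; infer_instance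

-- ===== CLAIM (what is proved, stated in full; the proofs are below) =====
def Claim_equal_categorize_blocks : Prop := ∀ (block_mapping : List (Int × List (String × String))), Dom_categorize_blocks block_mapping → Spec_categorize_blocks block_mapping (categorize_blocks block_mapping)

-- ===== LEMMAS AND PROOFS =====

-- The breakpoint-table lookup of B picks exactly the category name of A's if/elif chain.
theorem pvName_eq (id : Int) :
    (["placeholder", "terrain", "fluids", "processed", "functional", "advanced",
        "placeholder"].getD (pvIdxOf id) "") =
    (if 0 ≤ id ∧ id ≤ 49 then "terrain"
     else if 50 ≤ id ∧ id ≤ 59 then "fluids"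
     else if 60 ≤ id ∧ id ≤ 99 then "processed"
     else if 100 ≤ id ∧ id ≤ 149 then "functional"
     else if 150 ≤ id ∧ id ≤ 179 then "advanced"
     else "placeholder") := by
  unfold pvIdxOf
  split_ifs with h1 h2 h3 h4 h5
  · simp [List.countP_nil, h1.1,
      show ¬((50:Int) ≤ id) by omega, show ¬((60:Int) ≤ id) by omega,
      show ¬((100:Int) ≤ id) by omega, show ¬((150:Int) ≤ id) by omega,
      show ¬((180:Int) ≤ id) by omega]
  · simp [List.countP_nil,
      show ((0:Int) ≤ id) by omega, h2.1,
      show ¬((60:Int) ≤ id) by omega, show ¬((100:Int) ≤ id) by omega,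
      show ¬((150:Int) ≤ id) by omega, show ¬((180:Int) ≤ id) by omega]
  · simp [List.countP_nil,
      show ((0:Int) ≤ id) by omega, show ((50:Int) ≤ id) by omega, h3.1,
      show ¬((100:Int) ≤ id) by omega, show ¬((150:Int) ≤ id) by omega,
      show ¬((180:Int) ≤ id) by omega]
  · simp [List.countP_nil,
      show ((0:Int) ≤ id) by omega, show ((50:Int) ≤ id) by omega,
      show ((60:Int) ≤ id) by omega, h4.1,
      show ¬((150:Int) ≤ id) by omega, show ¬((180:Int) ≤ id) by omega]
  · simp [List.countP_nil,
      show ((0:Int) ≤ id) by omega, show ((50:Int) ≤ id) by omega,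
      show ((60:Int) ≤ id) by omega, show ((100:Int) ≤ id) by omega, h5.1,
      show ¬((180:Int) ≤ id) by omega]
  · -- id < 0 or id ≥ 180
    by_cases h : id < 0
    · simp [List.countP_nil,
        show ¬((0:Int) ≤ id) by omega, show ¬((50:Int) ≤ id) by omega,
        show ¬((60:Int) ≤ id) by omega, show ¬((100:Int) ≤ id) by omega,
        show ¬((150:Int) ≤ id) by omega, show ¬((180:Int) ≤ id) by omega]
    · have h180 : (180:Int) ≤ id := by omega
      simp [List.countP_nil, show ((0:Int) ≤ id) by omega,
        show ((50:Int) ≤ id) by omega, show ((60:Int) ≤ id) by omega,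
        show ((100:Int) ≤ id) by omega, show ((150:Int) ≤ id) by omega, h180]

-- ===== VERDICT (by name: the statement is the Claim_ definition above) =====
theorem categorize_blocks_spec : Claim_equal_categorize_blocks := by
  intro bm _
  show categorize_blocks bm = categorize_blocks_alt bm
  unfold categorize_blocks categorize_blocks_alt
  simp only [List.map]
  congr 1
  congr 1
  apply PySem.List.foldl_congr_mem
  intro cats p _
  rw [pvName_eq p.1]
  split_ifs <;> rfl
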